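-- pv_equiv track=rewrite | github.com/testezilson/tothetop | scripts/show_champion_history_lol.py | _resolve_campeao
-- ===== SOURCE A (Python) =====
-- def _resolve_campeao(busca, campeoes):
--     """Retorna nome exato do campeão a partir de busca (parcial)."""
--     busca = busca.strip()
--     matches = [c for c in campeoes if busca.casefold() in str(c).casefold()]
--     if not matches:
--         return None
--     if len(matches) == 1:
--         return matches[0]
--     # Primeiro que começa com a busca, senão o primeiro da lista
--     for c in matches:
--         if str(c).casefold().startswith(busca.casefold()):
--             return c
--     return matches[0]
-- ===== SOURCE B (Python) =====
-- def _resolve_campeao(busca, campeoes):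
--     """Retorna nome exato do campeão a partir de busca (parcial)."""
--     q = busca.strip().casefold()
--     first_starts = None
--     first_contains = None
--     for c in campeoes:
--         lc = str(c).casefold()
--         if first_starts is None and lc.startswith(q):
--             first_starts = c
--         if first_contains is None and q in lc:
--             first_contains = c
--     return first_starts if first_starts is not None else first_contains
-- ===== Notes on version B (the rewrite author's own statement) =====
-- stated objective: simpler
-- what changed: Replaces A's intermediate matches list, len checks and second scan by a single pass over campeoes that keeps the first startswith-match and the first contains-match (startswith wins), computing the casefolded query once instead of per element.
import Mathlib
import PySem

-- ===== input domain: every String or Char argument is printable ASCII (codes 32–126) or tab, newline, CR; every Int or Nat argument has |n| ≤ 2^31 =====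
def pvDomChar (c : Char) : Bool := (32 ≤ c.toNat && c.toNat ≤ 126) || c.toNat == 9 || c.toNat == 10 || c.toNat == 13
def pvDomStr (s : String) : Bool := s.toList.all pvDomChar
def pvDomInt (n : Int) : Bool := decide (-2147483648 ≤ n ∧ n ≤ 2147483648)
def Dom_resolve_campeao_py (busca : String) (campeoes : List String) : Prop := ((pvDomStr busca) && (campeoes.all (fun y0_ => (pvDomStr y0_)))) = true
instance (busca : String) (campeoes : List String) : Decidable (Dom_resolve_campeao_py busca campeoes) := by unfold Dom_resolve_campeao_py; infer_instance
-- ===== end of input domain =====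

-- B replaces A's filtered matches list and second scan by a single pass that keeps the
-- first startswith-match and the first contains-match (objective: simpler, one scan).
-- Python's str.casefold is ported as PySem.Str.lower — exact on the ASCII domain.

-- ===== PORT A =====
-- the 'for c in matches: if str(c).casefold().startswith(busca.casefold()): return c' loop
def pvALoop (q : String) : List String → Option String
  | [] => none
  | c :: rest =>
      if PySem.Str.startswith (PySem.Str.lower c) q then some c else pvALoop q rest

def resolve_campeao_py (busca : String) (campeoes : List String) : Option String :=
  let b := PySem.Str.strip busca
  let ms := campeoes.filter (fun c => PySem.Str.isIn (PySem.Str.lower b) (PySem.Str.lower c))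
  if ms.length = 0 then none
  else if ms.length = 1 then ms.head?
  else
    match pvALoop (PySem.Str.lower b) ms with
    | some c => some c
    | none => ms.head?

-- ===== PORT B =====
-- one fold step: (first startswith-match so far, first contains-match so far)
def pvBStep (q : String) (acc : Option String × Option String) (c : String) :
    Option String × Option String :=
  let lc := PySem.Str.lower c
  (if acc.1.isNone && PySem.Str.startswith lc q then some c else acc.1,
   if acc.2.isNone && PySem.Str.isIn q lc then some c else acc.2)

def resolve_campeao_py_alt (busca : String) (campeoes : List String) : Option String :=
  let q := PySem.Str.lower (PySem.Str.strip busca)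
  let st := campeoes.foldl (pvBStep q) (none, none)
  match st.1 with
  | some c => some c
  | none => st.2

-- ===== PRECONDITION & SPEC =====
def Spec_resolve_campeao_py (busca : String) (campeoes : List String) (out : Option String) : Prop := out = resolve_campeao_py_alt busca campeoes
instance (busca : String) (campeoes : List String) (out : Option String) : Decidable (Spec_resolve_campeao_py busca campeoes out) := by unfold Spec_resolve_campeao_py; infer_instance

-- ===== CLAIM (what is proved, stated in full; the proofs are below) =====
def Claim_equal_resolve_campeao_py : Prop := ∀ (busca : String) (campeoes : List String), Dom_resolve_campeao_py busca campeoes → Spec_resolve_campeao_py busca campeoes (resolve_campeao_py busca campeoes)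

-- ===== LEMMAS AND PROOFS =====

-- a startswith-match is a contains-match
theorem pvStarts_imp_isIn (q c : String)
    (h : PySem.Str.startswith c q = true) : PySem.Str.isIn q c = true := by
  rw [PySem.Str.isIn_iff_infix]
  exact ((PySem.Chars.startswith_iff _ _).mp (by simpa using h)).isInfix

-- A's for-loop is find? over the same predicate
theorem pvALoop_eq_find? (q : String) (l : List String) :
    pvALoop q l = l.find? (fun c => PySem.Str.startswith (PySem.Str.lower c) q) := by
  induction l with
  | nil => rfl
  | cons c rest ih =>
      cases h : PySem.Chars.startswith (PySem.Chars.lower c.toList) q.toList <;>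
        simp [pvALoop, List.find?, h, ih]

-- B's fold computes (s.or (first startswith-match), t.or (first contains-match))
theorem pvBFold_eq (q : String) (l : List String) (s t : Option String) :
    l.foldl (pvBStep q) (s, t) =
      (s.or (l.find? (fun c => PySem.Str.startswith (PySem.Str.lower c) q)),
       t.or (l.find? (fun c => PySem.Str.isIn q (PySem.Str.lower c)))) := by
  induction l generalizing s t with
  | nil => simp
  | cons c rest ih =>
      rw [List.foldl_cons, ih]
      cases s <;> cases t <;>
        cases h1 : PySem.Chars.startswith (PySem.Chars.lower c.toList) q.toList <;>
        cases h2 : PySem.Chars.isIn q.toList (PySem.Chars.lower c.toList) <;>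
          simp [pvBStep, List.find?, h1, h2]

-- filtering by a weaker predicate does not change the first match
theorem pvFind?_filter {α : Type} (l : List α) (p r : α → Bool)
    (h : ∀ c, p c = true → r c = true) :
    (l.filter r).find? p = l.find? p := by
  induction l with
  | nil => rfl
  | cons c rest ih =>
      by_cases hr : r c = true
      · by_cases hp : p c = true
        · simp [List.filter_cons, hr, List.find?, hp]
        · simp only [Bool.not_eq_true] at hp
          simp [List.filter_cons, hr, List.find?, hp, ih]
      · have hp : p c = false := by
          cases hpc : p c
          · rfl
          · exact absurd (h c hpc) hr
        simp only [Bool.not_eq_true] at hr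
        simp [List.filter_cons, hr, List.find?, hp, ih]

-- the first match is the head of the filtered list
theorem pvFind?_eq_head?_filter {α : Type} (l : List α) (p : α → Bool) :
    l.find? p = (l.filter p).head? := by
  induction l with
  | nil => rfl
  | cons c rest ih =>
      by_cases hp : p c = true
      · rw [List.find?_cons_of_pos hp, List.filter_cons_of_pos hp]
        rfl
      · rw [List.find?_cons_of_neg hp, List.filter_cons_of_neg (by simpa using hp), ih]

theorem pv_main (busca : String) (campeoes : List String) :
    resolve_campeao_py busca campeoes = resolve_campeao_py_alt busca campeoes := by
  simp only [resolve_campeao_py, resolve_campeao_py_alt]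
  rw [pvBFold_eq,
      ← pvFind?_filter campeoes
        (fun c => PySem.Str.startswith (PySem.Str.lower c) (PySem.Str.lower (PySem.Str.strip busca)))
        (fun c => PySem.Str.isIn (PySem.Str.lower (PySem.Str.strip busca)) (PySem.Str.lower c))
        (fun c hc => pvStarts_imp_isIn _ _ hc),
      pvFind?_eq_head?_filter campeoes
        (fun c => PySem.Str.isIn (PySem.Str.lower (PySem.Str.strip busca)) (PySem.Str.lower c)),
      pvALoop_eq_find?]
  simp only [Option.none_or]
  generalize campeoes.filter
      (fun c => PySem.Str.isIn (PySem.Str.lower (PySem.Str.strip busca)) (PySem.Str.lower c)) = ms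
  cases ms with
  | nil => simp
  | cons m rest =>
      cases rest with
      | nil =>
          cases hf : List.find?
              (fun c => PySem.Str.startswith (PySem.Str.lower c) (PySem.Str.lower (PySem.Str.strip busca))) [m] with
          | none => simp
          | some x =>
              have hx : x = m := by
                have := List.mem_of_find?_eq_some hf
                simpa using this
              subst hx
              simp
      | cons m2 rest2 =>
          cases hf : List.find?
              (fun c => PySem.Str.startswith (PySem.Str.lower c) (PySem.Str.lower (PySem.Str.strip busca))) (m :: m2 :: rest2) with
          | none => simp
          | some x => simp

-- ===== VERDICT (by name: the statement is the Claim_ definition above) =====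
theorem resolve_campeao_py_spec : Claim_equal_resolve_campeao_py := by
  intro busca campeoes _
  unfold Spec_resolve_campeao_py
  exact pv_main busca campeoes
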